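-- pv_equiv track=rewrite | github.com/katiesteckles/advent-of-code | 2020/day11.py | get_long_nbhd
-- ===== SOURCE A (Python) =====
-- def get_long_nbhd(x,y,gridwidth,gridheight):
--     long_nbhd = [
--                 [[x, y-i-1] for i in range(y)], # straight up
--                 [[x+i+1, y-j-1] for i, j in zip(range(gridwidth-x-1), range(y))],  # up and right
--                 [[x+i+1, y] for i in range(gridwidth-x-1)], # to the right
--                 [[x+i+1, y+j+1] for i,j in zip(range(gridwidth-x-1), range(gridheight-y-1))], # down and right
--                 [[x, y+i+1] for i in range(gridheight-y-1)], # to the bottom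
--                 [[x-i-1, y+j+1] for i, j in zip(range(x), range(gridheight-y-1))],  # down and left
--                 [[x-i-1, y] for i in range(x)], # to the left
--                 [[x-i-1, y-j-1] for i,j in zip(range(x), range(y))] # up and left
--                 ]
--     return long_nbhd
-- ===== SOURCE B (Python) =====
-- def get_long_nbhd(x, y, gridwidth, gridheight):
--     # Walk a cursor outward in each direction, stopping when it crosses the
--     # edge it is moving towards, instead of precomputing each ray's length.
--     def walk(cx, cy, dx, dy):
--         ray = []
--         while ((dx <= 0 or cx < gridwidth) and (dx >= 0 or cx >= 0)
--                and (dy <= 0 or cy < gridheight) and (dy >= 0 or cy >= 0)):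
--             ray.append([cx, cy])
--             cx += dx
--             cy += dy
--         return ray
--     return [walk(x + dx, y + dy, dx, dy)
--             for dx, dy in [(0, -1), (1, -1), (1, 0), (1, 1),
--                            (0, 1), (-1, 1), (-1, 0), (-1, -1)]]
-- ===== Notes on version B (the rewrite author's own statement) =====
-- stated objective: alternative
-- what changed: Instead of eight per-direction comprehensions whose lengths are precomputed with range/zip arithmetic, B walks a cursor step by step in each of the 8 directions, appending cells until the cursor crosses the edge it is moving towards; ray lengths are never computed.
import Mathlib
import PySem

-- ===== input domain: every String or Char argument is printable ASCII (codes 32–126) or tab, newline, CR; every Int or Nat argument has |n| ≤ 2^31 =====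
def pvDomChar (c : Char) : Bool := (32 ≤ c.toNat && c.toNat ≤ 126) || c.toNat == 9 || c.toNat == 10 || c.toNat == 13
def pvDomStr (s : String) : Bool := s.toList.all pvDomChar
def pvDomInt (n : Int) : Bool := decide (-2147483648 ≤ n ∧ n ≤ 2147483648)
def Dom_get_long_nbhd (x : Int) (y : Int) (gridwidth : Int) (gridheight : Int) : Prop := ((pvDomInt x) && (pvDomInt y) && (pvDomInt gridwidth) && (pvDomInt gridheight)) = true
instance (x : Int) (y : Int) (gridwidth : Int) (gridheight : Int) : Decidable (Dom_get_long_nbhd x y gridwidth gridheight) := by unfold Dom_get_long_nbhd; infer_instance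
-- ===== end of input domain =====

-- B replaces A's eight closed-form comprehensions by a step-by-step cursor walk per
-- direction that stops when the cursor crosses the edge it moves towards (alternative
-- decomposition, same cost).

-- ===== PORT A =====
def get_long_nbhd (x : Int) (y : Int) (gridwidth : Int) (gridheight : Int) : List (List (List Int)) :=
  [ (PySem.List.pyRange 0 y 1).map (fun i => [x, y - i - 1]),
    (((PySem.List.pyRange 0 (gridwidth - x - 1) 1).zip (PySem.List.pyRange 0 y 1)).map
      (fun p => [x + p.1 + 1, y - p.2 - 1])),
    (PySem.List.pyRange 0 (gridwidth - x - 1) 1).map (fun i => [x + i + 1, y]),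
    (((PySem.List.pyRange 0 (gridwidth - x - 1) 1).zip (PySem.List.pyRange 0 (gridheight - y - 1) 1)).map
      (fun p => [x + p.1 + 1, y + p.2 + 1])),
    (PySem.List.pyRange 0 (gridheight - y - 1) 1).map (fun i => [x, y + i + 1]),
    (((PySem.List.pyRange 0 x 1).zip (PySem.List.pyRange 0 (gridheight - y - 1) 1)).map
      (fun p => [x - p.1 - 1, y + p.2 + 1])),
    (PySem.List.pyRange 0 x 1).map (fun i => [x - i - 1, y]),
    (((PySem.List.pyRange 0 x 1).zip (PySem.List.pyRange 0 y 1)).map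
      (fun p => [x - p.1 - 1, y - p.2 - 1])) ]

-- ===== PORT B =====
-- the while-loop condition of Source B's walk
def pvOk (gridwidth gridheight dx dy cx cy : Int) : Bool :=
  (decide (dx ≤ 0) || decide (cx < gridwidth)) && (decide (0 ≤ dx) || decide (0 ≤ cx)) &&
  (decide (dy ≤ 0) || decide (cy < gridheight)) && (decide (0 ≤ dy) || decide (0 ≤ cy))

-- Source B's while loop as fuel recursion (fuel is only a totality guard; it is never exhausted)
def pvWalk (gridwidth gridheight dx dy : Int) : Nat → Int → Int → List (List Int)
  | 0, _, _ => []
  | fuel + 1, cx, cy =>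
    if pvOk gridwidth gridheight dx dy cx cy then
      [cx, cy] :: pvWalk gridwidth gridheight dx dy fuel (cx + dx) (cy + dy)
    else []

def get_long_nbhd_alt (x : Int) (y : Int) (gridwidth : Int) (gridheight : Int) : List (List (List Int)) :=
  ([(0, -1), (1, -1), (1, 0), (1, 1), (0, 1), (-1, 1), (-1, 0), (-1, -1)] : List (Int × Int)).map
    (fun d => pvWalk gridwidth gridheight d.1 d.2
      (x.natAbs + y.natAbs + gridwidth.natAbs + gridheight.natAbs) (x + d.1) (y + d.2))

-- ===== PRECONDITION & SPEC =====
def Spec_get_long_nbhd (x : Int) (y : Int) (gridwidth : Int) (gridheight : Int) (out : List (List (List Int))) : Prop := out = get_long_nbhd_alt x y gridwidth gridheight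
instance (x : Int) (y : Int) (gridwidth : Int) (gridheight : Int) (out : List (List (List Int))) : Decidable (Spec_get_long_nbhd x y gridwidth gridheight out) := by unfold Spec_get_long_nbhd; infer_instance

-- ===== CLAIM (what is proved, stated in full; the proofs are below) =====
def Claim_equal_get_long_nbhd : Prop := ∀ (x : Int) (y : Int) (gridwidth : Int) (gridheight : Int), Dom_get_long_nbhd x y gridwidth gridheight → Spec_get_long_nbhd x y gridwidth gridheight (get_long_nbhd x y gridwidth gridheight)

-- ===== LEMMAS AND PROOFS =====

-- zip of two ranges is the diagonal of the shorter one
theorem pv_zip_range (m n : Nat) :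
    (List.range m).zip (List.range n) = (List.range (min m n)).map (fun i => (i, i)) := by
  apply List.ext_getElem
  · simp
  · intro k h1 h2
    simp [List.getElem_zip]

-- the walk, characterised: if the condition holds for the first n steps and fails at step n,
-- the walk lists exactly those n cursor positions
theorem pvWalk_eq (gw gh dx dy : Int) (n : Nat) :
    ∀ (fuel : Nat) (cx cy : Int), n ≤ fuel →
    (∀ k : Nat, k < n → pvOk gw gh dx dy (cx + (k : Int) * dx) (cy + (k : Int) * dy) = true) →
    pvOk gw gh dx dy (cx + (n : Int) * dx) (cy + (n : Int) * dy) = false →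
    pvWalk gw gh dx dy fuel cx cy
      = (List.range n).map (fun k : Nat => ([cx + (k : Int) * dx, cy + (k : Int) * dy] : List Int)) := by
  induction n with
  | zero =>
    intro fuel cx cy _ _ hstop
    simp only [Nat.cast_zero, zero_mul, add_zero] at hstop
    cases fuel with
    | zero => simp [pvWalk]
    | succ f => simp [pvWalk, hstop]
  | succ n ih =>
    intro fuel cx cy hfuel hok hstop
    cases fuel with
    | zero => omega
    | succ f =>
      have h0 : pvOk gw gh dx dy cx cy = true := by
        have := hok 0 (Nat.succ_pos n); simpa using this
      have hok' : ∀ k : Nat, k < n →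
          pvOk gw gh dx dy ((cx + dx) + (k : Int) * dx) ((cy + dy) + (k : Int) * dy) = true := by
        intro k hk
        have h := hok (k + 1) (by omega)
        push_cast at h
        have e1 : cx + ((k : Int) + 1) * dx = (cx + dx) + (k : Int) * dx := by ring
        have e2 : cy + ((k : Int) + 1) * dy = (cy + dy) + (k : Int) * dy := by ring
        rwa [e1, e2] at h
      have hstop' :
          pvOk gw gh dx dy ((cx + dx) + (n : Int) * dx) ((cy + dy) + (n : Int) * dy) = false := by
        have h := hstop
        push_cast at h
        have e1 : cx + ((n : Int) + 1) * dx = (cx + dx) + (n : Int) * dx := by ring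
        have e2 : cy + ((n : Int) + 1) * dy = (cy + dy) + (n : Int) * dy := by ring
        rwa [e1, e2] at h
      simp only [pvWalk, h0, if_true]
      rw [ih f (cx + dx) (cy + dy) (by omega) hok' hstop']
      rw [List.range_succ_eq_map]
      simp only [List.map_cons, List.map_map, Nat.cast_zero, zero_mul, add_zero]
      congr 1
      apply List.map_congr_left
      intro k _
      simp only [Function.comp_apply]
      push_cast
      simp only [List.cons.injEq, and_true]
      constructor <;> ring

theorem get_long_nbhd_spec' (x y gw gh : Int) :
    get_long_nbhd x y gw gh = get_long_nbhd_alt x y gw gh := by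
  unfold get_long_nbhd get_long_nbhd_alt
  simp only [List.map_cons, List.map_nil]
  rw [PySem.List.pyRange_one (a := 0) (b := y),
      PySem.List.pyRange_one (a := 0) (b := gw - x - 1),
      PySem.List.pyRange_one (a := 0) (b := gh - y - 1),
      PySem.List.pyRange_one (a := 0) (b := x)]
  simp only [List.zip_map, pv_zip_range, List.map_map, sub_zero, List.cons.injEq, and_true]
  refine ⟨?_, ?_, ?_, ?_, ?_, ?_, ?_, ?_⟩
  · rw [pvWalk_eq gw gh 0 (-1) y.toNat (x.natAbs + y.natAbs + gw.natAbs + gh.natAbs) (x + 0) (y + (-1))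
        (by omega)
        (fun k hk => by simp [pvOk]; try omega)
        (by simp [pvOk]; try omega)]
    apply List.map_congr_left
    intro k _
    simp only [Function.comp_apply, List.cons.injEq, and_true]
    constructor <;> ring
  · rw [pvWalk_eq gw gh 1 (-1) (min (gw - x - 1).toNat y.toNat) (x.natAbs + y.natAbs + gw.natAbs + gh.natAbs) (x + 1) (y + (-1))
        (by omega)
        (fun k hk => by simp [pvOk]; try omega)
        (by simp [pvOk]; try omega)]
    apply List.map_congr_left
    intro k _
    simp only [Function.comp_apply, List.cons.injEq, and_true]
    constructor <;> (try simp only [Prod.map_fst, Prod.map_snd]) <;> ring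
  · rw [pvWalk_eq gw gh 1 0 (gw - x - 1).toNat (x.natAbs + y.natAbs + gw.natAbs + gh.natAbs) (x + 1) (y + 0)
        (by omega)
        (fun k hk => by simp [pvOk]; try omega)
        (by simp [pvOk]; try omega)]
    apply List.map_congr_left
    intro k _
    simp only [Function.comp_apply, List.cons.injEq, and_true]
    constructor <;> ring
  · rw [pvWalk_eq gw gh 1 1 (min (gw - x - 1).toNat (gh - y - 1).toNat) (x.natAbs + y.natAbs + gw.natAbs + gh.natAbs) (x + 1) (y + 1)
        (by omega)
        (fun k hk => by simp [pvOk]; try omega)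
        (by simp [pvOk]; try omega)]
    apply List.map_congr_left
    intro k _
    simp only [Function.comp_apply, List.cons.injEq, and_true]
    constructor <;> (try simp only [Prod.map_fst, Prod.map_snd]) <;> ring
  · rw [pvWalk_eq gw gh 0 1 (gh - y - 1).toNat (x.natAbs + y.natAbs + gw.natAbs + gh.natAbs) (x + 0) (y + 1)
        (by omega)
        (fun k hk => by simp [pvOk]; try omega)
        (by simp [pvOk]; try omega)]
    apply List.map_congr_left
    intro k _
    simp only [Function.comp_apply, List.cons.injEq, and_true]
    constructor <;> ring
  · rw [pvWalk_eq gw gh (-1) 1 (min x.toNat (gh - y - 1).toNat) (x.natAbs + y.natAbs + gw.natAbs + gh.natAbs) (x + (-1)) (y + 1)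
        (by omega)
        (fun k hk => by simp [pvOk]; try omega)
        (by simp [pvOk]; try omega)]
    apply List.map_congr_left
    intro k _
    simp only [Function.comp_apply, List.cons.injEq, and_true]
    constructor <;> (try simp only [Prod.map_fst, Prod.map_snd]) <;> ring
  · rw [pvWalk_eq gw gh (-1) 0 x.toNat (x.natAbs + y.natAbs + gw.natAbs + gh.natAbs) (x + (-1)) (y + 0)
        (by omega)
        (fun k hk => by simp [pvOk]; try omega)
        (by simp [pvOk]; try omega)]
    apply List.map_congr_left
    intro k _
    simp only [Function.comp_apply, List.cons.injEq, and_true]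
    constructor <;> ring
  · rw [pvWalk_eq gw gh (-1) (-1) (min x.toNat y.toNat) (x.natAbs + y.natAbs + gw.natAbs + gh.natAbs) (x + (-1)) (y + (-1))
        (by omega)
        (fun k hk => by simp [pvOk]; try omega)
        (by simp [pvOk]; try omega)]
    apply List.map_congr_left
    intro k _
    simp only [Function.comp_apply, List.cons.injEq, and_true]
    constructor <;> (try simp only [Prod.map_fst, Prod.map_snd]) <;> ring

-- ===== VERDICT (by name: the statement is the Claim_ definition above) =====
theorem get_long_nbhd_spec : Claim_equal_get_long_nbhd := by
  intro x y gw gh _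
  unfold Spec_get_long_nbhd
  exact get_long_nbhd_spec' x y gw gh
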